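-- pv_equiv track=rewrite | github.com/ckoons/BubbleSpacetimeTheory | play/toy_248_gilkey_polynomial.py | _dim_D
-- ===== SOURCE A (Python) =====
-- def _dim_D(p, q, r):
--     """Weyl dimension for type D_r, weight (p, q, 0, ..., 0).
--
--     ρ_i = r - i, so ρ = (r-1, r-2, ..., 1, 0).
--     l_i = λ_i + r - i.
--
--     dim = ∏_{i<j} (l_i² - l_j²) / (ρ_i² - ρ_j²)
--
--     Special care: ρ_r = 0, l_r = λ_r + 0 = λ_r = 0 (for our weight).
--     """
--     lam = [0] * (r + 1)
--     lam[1] = p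
--     lam[2] = q
--
--     l = [0] * (r + 1)
--     rho = [0] * (r + 1)
--     for i in range(1, r + 1):
--         rho[i] = r - i
--         l[i] = lam[i] + rho[i]
--
--     num = 1
--     den = 1
--
--     for i in range(1, r + 1):
--         for j in range(i + 1, r + 1):
--             num *= (l[i] * l[i] - l[j] * l[j])
--             d = rho[i] * rho[i] - rho[j] * rho[j]
--             if d == 0:
--                 # This happens when rho[i] = rho[j] = 0, i.e., r-i = r-j = 0
--                 # which means i = j = r. But i < j, so this can't happen.
--                 # It CAN happen when rho[i] = -rho[j], but rho values are
--                 # non-negative in our convention. Actually rho[r] = 0 and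
--                 # rho[r-1] = 1, so rho[r-1]² - rho[r]² = 1 ≠ 0.
--                 raise ValueError(f"Zero denominator: rho[{i}]={rho[i]}, rho[{j}]={rho[j]}")
--             den *= d
--
--     return num // den
-- ===== SOURCE B (Python) =====
-- def _dim_D(p, q, r):
--     """Weyl dimension for type D_r, weight (p, q, 0, ..., 0).
--
--     Only rows i = 1, 2 of the pair product differ from the Weyl-vector
--     rows (l_i = rho_i for i >= 3), so every pair with i, j >= 3 contributes
--     the same factor to numerator and denominator and cancels.  Compute only
--     the O(r) surviving factors.
--     """
--     s1 = (p + r - 1) ** 2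
--     s2 = (q + r - 2) ** 2
--     t1 = (r - 1) ** 2
--     t2 = (r - 2) ** 2
--     num = s1 - s2
--     den = t1 - t2
--     for j in range(3, r + 1):
--         m = (r - j) ** 2
--         num *= (s1 - m) * (s2 - m)
--         den *= (t1 - m) * (t2 - m)
--     return num // den
-- ===== Notes on version B (the rewrite author's own statement) =====
-- stated objective: faster
-- what changed: Instead of A's double loop over all pairs i<j, B uses that l_i = rho_i for every i >= 3, so all pair factors with i,j >= 3 cancel between numerator and denominator; B multiplies only the O(r) surviving factors involving rows 1 and 2 in a single pass.
import Mathlib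
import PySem

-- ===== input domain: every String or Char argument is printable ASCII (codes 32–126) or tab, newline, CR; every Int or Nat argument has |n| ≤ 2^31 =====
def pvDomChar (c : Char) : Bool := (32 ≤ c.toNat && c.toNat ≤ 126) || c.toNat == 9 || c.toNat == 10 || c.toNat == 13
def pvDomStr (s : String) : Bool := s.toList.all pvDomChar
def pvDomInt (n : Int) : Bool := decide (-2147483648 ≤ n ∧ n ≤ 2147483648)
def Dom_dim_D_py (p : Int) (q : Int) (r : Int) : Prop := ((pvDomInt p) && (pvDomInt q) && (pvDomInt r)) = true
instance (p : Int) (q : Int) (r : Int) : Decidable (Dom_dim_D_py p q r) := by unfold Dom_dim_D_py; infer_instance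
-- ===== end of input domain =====

-- B computes only the O(r) pair factors involving rows 1 and 2 (the rest cancel), instead of A's O(r^2) double loop.


-- ===== PORT A =====
def dim_D_py (p : Int) (q : Int) (r : Int) : Int :=
  -- lam = [0] * (r + 1); lam[1] = p; lam[2] = q   (indices in range under Pre_, r ≥ 2)
  let lam : List Int :=
    PySem.List.pySetD (PySem.List.pySetD (List.replicate (r + 1).toNat (0 : Int)) 1 p) 2 q
  -- l = [0]*(r+1); rho = [0]*(r+1); for i in range(1, r+1): rho[i] = r - i; l[i] = lam[i] + rho[i]
  let lr : List Int × List Int :=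
    (PySem.List.pyRange 1 (r + 1) 1).foldl
      (fun st i =>
        let rho := PySem.List.pySetD st.2 i (r - i)
        let l := PySem.List.pySetD st.1 i
          (PySem.List.pyGetD lam i 0 + PySem.List.pyGetD rho i 0)
        (l, rho))
      (List.replicate (r + 1).toNat (0 : Int), List.replicate (r + 1).toNat (0 : Int))
  -- num = 1; den = 1; nested pair loop; the 'raise ValueError' branch is modelled as state none
  let res : Option (Int × Int) :=
    (PySem.List.pyRange 1 (r + 1) 1).foldl
      (fun st i =>
        (PySem.List.pyRange (i + 1) (r + 1) 1).foldl
          (fun st j =>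
            match st with
            | none => none
            | some nd =>
              let li := PySem.List.pyGetD lr.1 i 0
              let lj := PySem.List.pyGetD lr.1 j 0
              let num := nd.1 * (li * li - lj * lj)
              let ri := PySem.List.pyGetD lr.2 i 0
              let rj := PySem.List.pyGetD lr.2 j 0
              let d := ri * ri - rj * rj
              if d = 0 then none else some (num, nd.2 * d))
          st)
      (some (1, 1))
  match res with
  | some nd => PySem.Int.floordiv nd.1 nd.2
  | none => 0   -- the ValueError branch; never reached under Pre_

-- ===== PORT B =====
def dim_D_py_alt (p : Int) (q : Int) (r : Int) : Int :=
  let s1 := (p + r - 1) ^ 2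
  let s2 := (q + r - 2) ^ 2
  let t1 := (r - 1) ^ 2
  let t2 := (r - 2) ^ 2
  let nd : Int × Int :=
    (PySem.List.pyRange 3 (r + 1) 1).foldl
      (fun st j =>
        let m := (r - j) ^ 2
        (st.1 * ((s1 - m) * (s2 - m)), st.2 * ((t1 - m) * (t2 - m))))
      (s1 - s2, t1 - t2)
  PySem.Int.floordiv nd.1 nd.2

-- ===== PRECONDITION & SPEC =====
-- Pre_ excludes exactly r ≤ 1, where A raises IndexError on lam[1]/lam[2] (list of length r+1 < 3).
def Pre_dim_D_py (_p : Int) (_q : Int) (r : Int) : Prop := 2 ≤ r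
instance (p : Int) (q : Int) (r : Int) : Decidable (Pre_dim_D_py p q r) := by
  unfold Pre_dim_D_py; infer_instance

def pvWitness_dim_D_py : Int × Int × Int := (1, 1, 3)

def Spec_dim_D_py (p : Int) (q : Int) (r : Int) (out : Int) : Prop := out = dim_D_py_alt p q r
instance (p : Int) (q : Int) (r : Int) (out : Int) : Decidable (Spec_dim_D_py p q r out) := by
  unfold Spec_dim_D_py; infer_instance

-- ===== CLAIM (what is proved, stated in full; the proofs are below) =====
def Claim_equal_dim_D_py : Prop := ∀ (p : Int) (q : Int) (r : Int), Dom_dim_D_py p q r → Pre_dim_D_py p q r → Spec_dim_D_py p q r (dim_D_py p q r)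

-- ===== LEMMAS AND PROOFS =====

-- l_i (= λ_i + ρ_i) as a closed form, and the two pair factors
def pvLv (p q r i : Int) : Int := (if i = 2 then q else if i = 1 then p else 0) + (r - i)
def pvF (p q r i j : Int) : Int :=
  pvLv p q r i * pvLv p q r i - pvLv p q r j * pvLv p q r j
def pvG (r i j : Int) : Int := (r - i) * (r - i) - (r - j) * (r - j)

lemma pv_getD_setD (xs : List Int) (a j v : Int) (ha : 0 ≤ a) (hj : 0 ≤ j)
    (hlen : a < (xs.length : Int)) :
    PySem.List.pyGetD (PySem.List.pySetD xs a v) j 0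
      = if j = a then v else PySem.List.pyGetD xs j 0 := by
  have h1 := PySem.List.pyGetD_pySetD_natCast xs a.toNat j.toNat v 0 (by omega)
  rw [Int.toNat_of_nonneg ha, Int.toNat_of_nonneg hj] at h1
  rw [h1]
  by_cases h : j = a
  · subst h; simp
  · rw [if_neg (by omega), if_neg h]

lemma pv_getD_replicate (n : Nat) (j : Int) (hj : 0 ≤ j) :
    PySem.List.pyGetD (List.replicate n (0 : Int)) j 0 = 0 := by
  rw [PySem.List.pyGetD_of_nonneg _ _ hj]
  rcases Nat.lt_or_ge j.toNat n with h | h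
  · simp [List.getD, h]
  · simp [List.getD, Nat.not_lt.mpr h]

lemma pv_lam_getD (p q r j : Int) (h2 : 2 ≤ r) (hj0 : 0 ≤ j) :
    PySem.List.pyGetD
      (PySem.List.pySetD (PySem.List.pySetD (List.replicate (r + 1).toNat (0 : Int)) 1 p) 2 q)
      j 0 = if j = 2 then q else if j = 1 then p else 0 := by
  rw [pv_getD_setD _ _ _ _ (by omega) hj0
      (by rw [PySem.List.length_pySetD, List.length_replicate]; omega)]
  by_cases hj2 : j = 2
  · simp [hj2]
  · rw [if_neg hj2, if_neg hj2,
      pv_getD_setD _ _ _ _ (by omega) hj0 (by rw [List.length_replicate]; omega)]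
    by_cases hj1 : j = 1
    · simp [hj1]
    · rw [if_neg hj1, if_neg hj1, pv_getD_replicate _ _ hj0]

-- characterisation of the l/rho building loop of port A
lemma pv_build_spec (r : Int) (lam : List Int) :
    ∀ (k : Nat) (a : Int) (st : List Int × List Int), 0 ≤ a → (r + 1 - a).toNat = k →
      st.1.length = (r + 1).toNat → st.2.length = (r + 1).toNat →
      ∀ j : Int, 0 ≤ j → j ≤ r →
        (PySem.List.pyGetD
            ((PySem.List.pyRange a (r + 1) 1).foldl
              (fun st i =>
                let rho := PySem.List.pySetD st.2 i (r - i)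
                let l := PySem.List.pySetD st.1 i
                  (PySem.List.pyGetD lam i 0 + PySem.List.pyGetD rho i 0)
                (l, rho)) st).1 j 0
          = if a ≤ j then PySem.List.pyGetD lam j 0 + (r - j) else PySem.List.pyGetD st.1 j 0)
        ∧ (PySem.List.pyGetD
            ((PySem.List.pyRange a (r + 1) 1).foldl
              (fun st i =>
                let rho := PySem.List.pySetD st.2 i (r - i)
                let l := PySem.List.pySetD st.1 i
                  (PySem.List.pyGetD lam i 0 + PySem.List.pyGetD rho i 0)
                (l, rho)) st).2 j 0
          = if a ≤ j then r - j else PySem.List.pyGetD st.2 j 0) := by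
  intro k
  induction k with
  | zero =>
    intro a st ha hk h1 h2 j hj0 hjr
    rw [PySem.List.pyRange_one_eq_nil (by omega)]
    simp only [List.foldl_nil]
    rw [if_neg (by omega), if_neg (by omega)]
    exact ⟨rfl, rfl⟩
  | succ k ih =>
    intro a st ha hk h1 h2 j hj0 hjr
    have halt : a < r + 1 := by omega
    rw [PySem.List.pyRange_one_cons halt]
    simp only [List.foldl_cons]
    have hlen1 : a < ((PySem.List.pySetD st.2 a (r - a)).length : Int) := by
      rw [PySem.List.length_pySetD]; omega
    have hrho : PySem.List.pyGetD (PySem.List.pySetD st.2 a (r - a)) a 0 = r - a := by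
      rw [pv_getD_setD _ _ _ _ ha ha (by rw [h2]; omega)]; simp
    set st' : List Int × List Int :=
      (PySem.List.pySetD st.1 a (PySem.List.pyGetD lam a 0 +
          PySem.List.pyGetD (PySem.List.pySetD st.2 a (r - a)) a 0),
        PySem.List.pySetD st.2 a (r - a)) with hst'
    have h1' : st'.1.length = (r + 1).toNat := by
      rw [hst']; simp only [PySem.List.length_pySetD]; exact h1
    have h2' : st'.2.length = (r + 1).toNat := by
      rw [hst']; simp only [PySem.List.length_pySetD]; exact h2
    have ihres := ih (a + 1) st' (by omega) (by omega) h1' h2' j hj0 hjr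
    refine ⟨?_, ?_⟩
    · rw [show ((PySem.List.pyRange (a + 1) (r + 1) 1).foldl _ _) = _ from rfl] at ihres
      rw [ihres.1]
      by_cases hja : j = a
      · rw [if_neg (by omega), if_pos (by omega), hst']
        simp only
        rw [pv_getD_setD _ _ _ _ ha hj0 (by rw [h1]; omega), if_pos hja, hrho, hja]
      · by_cases hge : a + 1 ≤ j
        · rw [if_pos hge, if_pos (by omega)]
        · rw [if_neg hge, if_neg (by omega), hst']
          simp only
          rw [pv_getD_setD _ _ _ _ ha hj0 (by rw [h1]; omega), if_neg hja]
    · rw [ihres.2]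
      by_cases hja : j = a
      · rw [if_neg (by omega), if_pos (by omega), hst']
        simp only
        rw [pv_getD_setD _ _ _ _ ha hj0 (by rw [h2]; omega), if_pos hja, hja]
      · by_cases hge : a + 1 ≤ j
        · rw [if_pos hge, if_pos (by omega)]
        · rw [if_neg hge, if_neg (by omega), hst']
          simp only
          rw [pv_getD_setD _ _ _ _ ha hj0 (by rw [h2]; omega), if_neg hja]

-- generic: a foldl whose step multiplies both components (Option-carrying, for A's raise branch)
lemma pv_foldl_some (h : Option (Int × Int) → Int → Option (Int × Int)) (Pf Qf : Int → Int) :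
    ∀ (js : List Int),
      (∀ i ∈ js, ∀ n d : Int, h (some (n, d)) i = some (n * Pf i, d * Qf i)) →
      ∀ n d : Int,
        js.foldl h (some (n, d)) = some (n * (js.map Pf).prod, d * (js.map Qf).prod) := by
  intro js
  induction js with
  | nil => intro _ n d; simp
  | cons x xs ih =>
    intro hstep n d
    rw [List.foldl_cons, hstep x (by simp), ih (fun i hi => hstep i (by simp [hi]))]
    simp [mul_assoc]

-- generic: B's plain pair foldl
lemma pv_foldl_pair (Pf Qf : Int → Int) :
    ∀ (js : List Int) (n d : Int),
      js.foldl (fun (st : Int × Int) j => (st.1 * Pf j, st.2 * Qf j)) (n, d)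
        = (n * (js.map Pf).prod, d * (js.map Qf).prod) := by
  intro js
  induction js with
  | nil => intro n d; simp
  | cons x xs ih =>
    intro n d
    rw [List.foldl_cons, ih]
    simp [mul_assoc]

lemma pv_G_pos (r i j : Int) (hij : i < j) (hjr : j ≤ r) : 0 < pvG r i j := by
  have h : pvG r i j = (j - i) * (2 * r - i - j) := by unfold pvG; ring
  rw [h]
  exact mul_pos (by omega) (by omega)

lemma pvF_eq_pvG (p q r i j : Int) (hi : 3 ≤ i) (hj : 3 ≤ j) :
    pvF p q r i j = pvG r i j := by
  unfold pvF pvG pvLv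
  rw [if_neg (by omega), if_neg (by omega), if_neg (by omega), if_neg (by omega)]
  ring

-- nested double loop of port A, evaluated to a double product (L/R abstract the built lists)
lemma pv_main (p q r : Int) (L R : List Int)
    (hL : ∀ i : Int, 1 ≤ i → i ≤ r → PySem.List.pyGetD L i 0 = pvLv p q r i)
    (hR : ∀ i : Int, 1 ≤ i → i ≤ r → PySem.List.pyGetD R i 0 = r - i) :
    (match
      (PySem.List.pyRange 1 (r + 1) 1).foldl
        (fun st i =>
          (PySem.List.pyRange (i + 1) (r + 1) 1).foldl
            (fun st j =>
              match st with
              | none => none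
              | some nd =>
                let li := PySem.List.pyGetD L i 0
                let lj := PySem.List.pyGetD L j 0
                let num := nd.1 * (li * li - lj * lj)
                let ri := PySem.List.pyGetD R i 0
                let rj := PySem.List.pyGetD R j 0
                let d := ri * ri - rj * rj
                if d = 0 then none else some (num, nd.2 * d))
            st)
        (some (1, 1)) with
     | some nd => PySem.Int.floordiv nd.1 nd.2
     | none => 0) = PySem.Int.floordiv
      (((PySem.List.pyRange 1 (r + 1) 1).map
        (fun i => ((PySem.List.pyRange (i + 1) (r + 1) 1).map (fun j => pvF p q r i j)).prod)).prod)
      (((PySem.List.pyRange 1 (r + 1) 1).map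
        (fun i => ((PySem.List.pyRange (i + 1) (r + 1) 1).map (fun j => pvG r i j)).prod)).prod) := by
  have hstep : ∀ i ∈ PySem.List.pyRange 1 (r + 1) 1, ∀ n d : Int,
      (PySem.List.pyRange (i + 1) (r + 1) 1).foldl
        (fun st j =>
          match st with
          | none => none
          | some nd =>
            let li := PySem.List.pyGetD L i 0
            let lj := PySem.List.pyGetD L j 0
            let num := nd.1 * (li * li - lj * lj)
            let ri := PySem.List.pyGetD R i 0
            let rj := PySem.List.pyGetD R j 0
            let d := ri * ri - rj * rj
            if d = 0 then none else some (num, nd.2 * d))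
        (some (n, d))
      = some (n * ((PySem.List.pyRange (i + 1) (r + 1) 1).map (fun j => pvF p q r i j)).prod,
              d * ((PySem.List.pyRange (i + 1) (r + 1) 1).map (fun j => pvG r i j)).prod) := by
    intro i hi n d
    obtain ⟨hi1, hi2⟩ := PySem.List.mem_pyRange_one.mp hi
    have hcong : ∀ (acc : Option (Int × Int)), ∀ j ∈ PySem.List.pyRange (i + 1) (r + 1) 1,
        (fun st j =>
          match st with
          | none => none
          | some nd =>
            let li := PySem.List.pyGetD L i 0
            let lj := PySem.List.pyGetD L j 0
            let num := nd.1 * (li * li - lj * lj)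
            let ri := PySem.List.pyGetD R i 0
            let rj := PySem.List.pyGetD R j 0
            let d := ri * ri - rj * rj
            if d = 0 then none else some (num, nd.2 * d)) acc j
        = (fun st j =>
          match st with
          | none => none
          | some nd =>
            if pvG r i j = 0 then none
            else some (nd.1 * pvF p q r i j, nd.2 * pvG r i j)) acc j := by
      intro acc j hj
      obtain ⟨hj1, hj2⟩ := PySem.List.mem_pyRange_one.mp hj
      cases acc with
      | none => rfl
      | some nd =>
        simp only
        rw [hL i hi1 (by omega), hL j (by omega) (by omega),
          hR i hi1 (by omega), hR j (by omega) (by omega)]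
        simp only [pvF, pvG]
    rw [PySem.List.foldl_congr_mem _ _ _ _ hcong]
    rw [pv_foldl_some _ (fun j => pvF p q r i j) (fun j => pvG r i j) _ ?_ n d]
    intro j hj n' d'
    obtain ⟨hj1, hj2⟩ := PySem.List.mem_pyRange_one.mp hj
    simp only
    rw [if_neg (pv_G_pos r i j (by omega) (by omega)).ne']
  rw [pv_foldl_some _
    (fun i => ((PySem.List.pyRange (i + 1) (r + 1) 1).map (fun j => pvF p q r i j)).prod)
    (fun i => ((PySem.List.pyRange (i + 1) (r + 1) 1).map (fun j => pvG r i j)).prod)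
    _ hstep 1 1]
  simp only [one_mul]

lemma pv_portA_eval (p q r : Int) (h2 : 2 ≤ r) :
    dim_D_py p q r = PySem.Int.floordiv
      (((PySem.List.pyRange 1 (r + 1) 1).map
        (fun i => ((PySem.List.pyRange (i + 1) (r + 1) 1).map (fun j => pvF p q r i j)).prod)).prod)
      (((PySem.List.pyRange 1 (r + 1) 1).map
        (fun i => ((PySem.List.pyRange (i + 1) (r + 1) 1).map (fun j => pvG r i j)).prod)).prod) := by
  have hb := pv_build_spec r
    (PySem.List.pySetD (PySem.List.pySetD (List.replicate (r + 1).toNat (0 : Int)) 1 p) 2 q)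
    (r + 1 - 1).toNat 1
    (List.replicate (r + 1).toNat (0 : Int), List.replicate (r + 1).toNat (0 : Int))
    (by omega) rfl (by simp) (by simp)
  have hL : ∀ i : Int, 1 ≤ i → i ≤ r →
      PySem.List.pyGetD
        ((PySem.List.pyRange 1 (r + 1) 1).foldl
          (fun st i =>
            let rho := PySem.List.pySetD st.2 i (r - i)
            let l := PySem.List.pySetD st.1 i
              (PySem.List.pyGetD
                (PySem.List.pySetD (PySem.List.pySetD (List.replicate (r + 1).toNat (0 : Int)) 1 p) 2 q)
                i 0 + PySem.List.pyGetD rho i 0)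
            (l, rho))
          (List.replicate (r + 1).toNat (0 : Int), List.replicate (r + 1).toNat (0 : Int))).1 i 0
      = pvLv p q r i := by
    intro i h1 hr
    have h := (hb i (by omega) hr).1
    rw [if_pos h1, pv_lam_getD p q r i h2 (by omega)] at h
    rw [h]; rfl
  have hR : ∀ i : Int, 1 ≤ i → i ≤ r →
      PySem.List.pyGetD
        ((PySem.List.pyRange 1 (r + 1) 1).foldl
          (fun st i =>
            let rho := PySem.List.pySetD st.2 i (r - i)
            let l := PySem.List.pySetD st.1 i
              (PySem.List.pyGetD
                (PySem.List.pySetD (PySem.List.pySetD (List.replicate (r + 1).toNat (0 : Int)) 1 p) 2 q)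
                i 0 + PySem.List.pyGetD rho i 0)
            (l, rho))
          (List.replicate (r + 1).toNat (0 : Int), List.replicate (r + 1).toNat (0 : Int))).2 i 0
      = r - i := by
    intro i h1 hr
    have h := (hb i (by omega) hr).2
    rw [if_pos h1] at h
    exact h
  exact pv_main p q r _ _ hL hR

lemma pv_portB_eval (p q r : Int) :
    dim_D_py_alt p q r = PySem.Int.floordiv
      (((p + r - 1) ^ 2 - (q + r - 2) ^ 2) * ((PySem.List.pyRange 3 (r + 1) 1).map
        (fun j => ((p + r - 1) ^ 2 - (r - j) ^ 2) * ((q + r - 2) ^ 2 - (r - j) ^ 2))).prod)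
      (((r - 1) ^ 2 - (r - 2) ^ 2) * ((PySem.List.pyRange 3 (r + 1) 1).map
        (fun j => ((r - 1) ^ 2 - (r - j) ^ 2) * ((r - 2) ^ 2 - (r - j) ^ 2))).prod) := by
  show PySem.Int.floordiv
      ((PySem.List.pyRange 3 (r + 1) 1).foldl
        (fun (st : Int × Int) j =>
          (st.1 * (((p + r - 1) ^ 2 - (r - j) ^ 2) * ((q + r - 2) ^ 2 - (r - j) ^ 2)),
           st.2 * (((r - 1) ^ 2 - (r - j) ^ 2) * ((r - 2) ^ 2 - (r - j) ^ 2))))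
        ((p + r - 1) ^ 2 - (q + r - 2) ^ 2, (r - 1) ^ 2 - (r - 2) ^ 2)).1
      ((PySem.List.pyRange 3 (r + 1) 1).foldl
        (fun (st : Int × Int) j =>
          (st.1 * (((p + r - 1) ^ 2 - (r - j) ^ 2) * ((q + r - 2) ^ 2 - (r - j) ^ 2)),
           st.2 * (((r - 1) ^ 2 - (r - j) ^ 2) * ((r - 2) ^ 2 - (r - j) ^ 2))))
        ((p + r - 1) ^ 2 - (q + r - 2) ^ 2, (r - 1) ^ 2 - (r - 2) ^ 2)).2
    = _
  rw [pv_foldl_pair]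

-- ===== VERDICT (by name: the statement is the Claim_ definition above) =====
theorem dim_D_py_spec : Claim_equal_dim_D_py := by
  intro p q r _ hpre
  have h2 : 2 ≤ r := hpre
  unfold Spec_dim_D_py
  rw [pv_portA_eval p q r h2, pv_portB_eval p q r]
  -- split off rows 1 and 2; everything else is common to numerator and denominator
  have hsplit : PySem.List.pyRange 1 (r + 1) 1 = 1 :: 2 :: PySem.List.pyRange 3 (r + 1) 1 := by
    rw [PySem.List.pyRange_one_cons (by omega : (1 : Int) < r + 1),
      PySem.List.pyRange_one_cons (by omega : (1 : Int) + 1 < r + 1)]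
    norm_num
  have hsplit2 : PySem.List.pyRange (1 + 1) (r + 1) 1 = 2 :: PySem.List.pyRange 3 (r + 1) 1 := by
    rw [PySem.List.pyRange_one_cons (by omega : (1 : Int) + 1 < r + 1)]
    norm_num
  rw [hsplit, List.map_cons, List.map_cons, List.prod_cons, List.prod_cons,
    List.map_cons, List.map_cons, List.prod_cons, List.prod_cons,
    hsplit2, List.map_cons, List.prod_cons, List.map_cons, List.prod_cons]
  rw [show (2 : Int) + 1 = 3 from by norm_num]
  have hF12 : pvF p q r 1 2 = (p + r - 1) ^ 2 - (q + r - 2) ^ 2 := by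
    simp only [pvF, pvLv]; norm_num; ring
  have hG12 : pvG r 1 2 = (r - 1) ^ 2 - (r - 2) ^ 2 := by
    simp only [pvG]; ring
  have hRnum : List.map (fun j => ((p + r - 1) ^ 2 - (r - j) ^ 2) * ((q + r - 2) ^ 2 - (r - j) ^ 2))
        (PySem.List.pyRange 3 (r + 1) 1)
      = List.map (fun j => pvF p q r 1 j * pvF p q r 2 j) (PySem.List.pyRange 3 (r + 1) 1) := by
    apply List.map_congr_left
    intro j hj
    obtain ⟨hj1, hj2⟩ := PySem.List.mem_pyRange_one.mp hj
    simp only [pvF, pvLv, if_neg (by omega : ¬ j = 2), if_neg (by omega : ¬ j = 1)]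
    norm_num; ring
  have hRden : List.map (fun j => ((r - 1) ^ 2 - (r - j) ^ 2) * ((r - 2) ^ 2 - (r - j) ^ 2))
        (PySem.List.pyRange 3 (r + 1) 1)
      = List.map (fun j => pvG r 1 j * pvG r 2 j) (PySem.List.pyRange 3 (r + 1) 1) := by
    apply List.map_congr_left
    intro j hj
    simp only [pvG]; ring
  rw [hRnum, hRden, List.prod_map_mul, List.prod_map_mul, ← hF12, ← hG12]
  have hc : List.map (fun i => (List.map (fun j => pvF p q r i j)
        (PySem.List.pyRange (i + 1) (r + 1) 1)).prod) (PySem.List.pyRange 3 (r + 1) 1)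
      = List.map (fun i => (List.map (fun j => pvG r i j)
        (PySem.List.pyRange (i + 1) (r + 1) 1)).prod) (PySem.List.pyRange 3 (r + 1) 1) := by
    apply List.map_congr_left
    intro i hi
    obtain ⟨hi1, hi2⟩ := PySem.List.mem_pyRange_one.mp hi
    refine congrArg List.prod (List.map_congr_left fun j hj => ?_)
    obtain ⟨hj1, hj2⟩ := PySem.List.mem_pyRange_one.mp hj
    exact pvF_eq_pvG p q r i j (by omega) (by omega)
  rw [hc]
  have hcpos : 0 < (List.map (fun i => (List.map (fun j => pvG r i j)
      (PySem.List.pyRange (i + 1) (r + 1) 1)).prod) (PySem.List.pyRange 3 (r + 1) 1)).prod := by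
    apply List.prod_pos
    intro x hx
    obtain ⟨i, hi, rfl⟩ := List.mem_map.mp hx
    obtain ⟨hi1, hi2⟩ := PySem.List.mem_pyRange_one.mp hi
    apply List.prod_pos
    intro y hy
    obtain ⟨j, hj, rfl⟩ := List.mem_map.mp hy
    obtain ⟨hj1, hj2⟩ := PySem.List.mem_pyRange_one.mp hj
    exact pv_G_pos r i j (by omega) (by omega)
  generalize hgc : (List.map (fun i => (List.map (fun j => pvG r i j)
      (PySem.List.pyRange (i + 1) (r + 1) 1)).prod) (PySem.List.pyRange 3 (r + 1) 1)).prod = c at hcpos ⊢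
  generalize (List.map (fun j => pvF p q r 1 j) (PySem.List.pyRange 3 (r + 1) 1)).prod = a1
  generalize (List.map (fun j => pvF p q r 2 j) (PySem.List.pyRange 3 (r + 1) 1)).prod = a2
  generalize (List.map (fun j => pvG r 1 j) (PySem.List.pyRange 3 (r + 1) 1)).prod = b1
  generalize (List.map (fun j => pvG r 2 j) (PySem.List.pyRange 3 (r + 1) 1)).prod = b2
  rw [show pvF p q r 1 2 * a1 * (a2 * c) = c * (pvF p q r 1 2 * (a1 * a2)) from by ring,
    show pvG r 1 2 * b1 * (b2 * c) = c * (pvG r 1 2 * (b1 * b2)) from by ring]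
  exact Int.mul_fdiv_mul_of_pos _ _ hcpos
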